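-- pv_equiv track=rewrite | github.com/yintao1995/VoiceReminder | main.py | split_into_happened_and_not_happened_ones
-- ===== SOURCE A (Python) =====
-- def split_into_happened_and_not_happened_ones(current_time_string: str, all_reminders_list: list):
--     """
--     以当前时间为准，将全部记录划分成已完成和未完成
--     """
--     all_reminders_list.sort(key=lambda x: x[0])
--     happened = []
--     not_happened = []
--     for i in range(len(all_reminders_list)):
--         if current_time_string >= all_reminders_list[i][0]:
--             # 这里加上=，则时间到了只提示一次就被列为happened
--             happened.append(all_reminders_list[i])
--         else:
--             not_happened.append(all_reminders_list[i])
--     return happened, not_happened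
-- ===== SOURCE B (Python) =====
-- def split_into_happened_and_not_happened_ones(current_time_string: str, all_reminders_list: list):
--     """
--     Sort in place, then binary-search the split point: since the list is sorted
--     by x[0], 'happened' is exactly the prefix with x[0] <= current_time_string.
--     """
--     all_reminders_list.sort(key=lambda x: x[0])
--     keys = [x[0] for x in all_reminders_list]
--     # hand-written bisect_right (this module imports nothing)
--     lo, hi = 0, len(keys)
--     while lo < hi:
--         mid = (lo + hi) // 2
--         if current_time_string < keys[mid]:
--             hi = mid
--         else:
--             lo = mid + 1
--     return all_reminders_list[:lo], all_reminders_list[lo:]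
-- ===== Notes on version B (the rewrite author's own statement) =====
-- stated objective: alternative
-- what changed: Replaces the linear classify-and-append loop by a binary search for the split point in the sorted list followed by two slices (bisect_right written by hand since the module imports nothing).
import Mathlib
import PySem

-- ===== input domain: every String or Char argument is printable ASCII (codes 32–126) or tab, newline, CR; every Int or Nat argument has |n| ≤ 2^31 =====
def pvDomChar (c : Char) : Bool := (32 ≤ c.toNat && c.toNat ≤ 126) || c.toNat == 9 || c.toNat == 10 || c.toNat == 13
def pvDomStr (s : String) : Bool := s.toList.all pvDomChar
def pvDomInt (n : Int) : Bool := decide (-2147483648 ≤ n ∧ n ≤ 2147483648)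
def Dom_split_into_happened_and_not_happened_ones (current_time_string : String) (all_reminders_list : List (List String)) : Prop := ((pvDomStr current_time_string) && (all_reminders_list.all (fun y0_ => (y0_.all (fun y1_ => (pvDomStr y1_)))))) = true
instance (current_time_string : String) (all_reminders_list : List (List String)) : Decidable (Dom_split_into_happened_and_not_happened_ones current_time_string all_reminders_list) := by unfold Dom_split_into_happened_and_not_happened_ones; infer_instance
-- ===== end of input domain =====

-- B replaces A's linear classify-and-append loop by a hand-written bisect_right on the
-- sorted keys plus two slices ('alternative'); both Pythons sort the argument in place —
-- the equivalence proved here is about the RETURN value (the mutation is identical anyway).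


-- ===== PORT A =====
-- key lambda x: x[0] — under Pre_ every reminder is nonempty, so x[0] = x.headD "" exactly
def split_into_happened_and_not_happened_ones (current_time_string : String) (all_reminders_list : List (List String)) : List (List String) × List (List String) :=
  let s := PySem.List.sorted all_reminders_list (fun x => x.headD "")
  -- for i in range(len(s)): classify s[i] by 'current_time_string >= s[i][0]', appending
  s.foldl (fun (acc : List (List String) × List (List String)) x =>
      if x.headD "" ≤ current_time_string then (acc.1 ++ [x], acc.2)
      else (acc.1, acc.2 ++ [x]))
    ([], [])

-- ===== PORT B =====
-- hand-written bisect_right loop of Source B; mid is always < keys.length, so getD "" is exact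
def pvBisectLoop (keys : List String) (t : String) (lo hi : Nat) : Nat :=
  if _h : lo < hi then
    let mid := (lo + hi) / 2
    if t < keys.getD mid "" then pvBisectLoop keys t lo mid
    else pvBisectLoop keys t (mid + 1) hi
  else lo
termination_by hi - lo
decreasing_by all_goals omega

def split_into_happened_and_not_happened_ones_alt (current_time_string : String) (all_reminders_list : List (List String)) : List (List String) × List (List String) :=
  let s := PySem.List.sorted all_reminders_list (fun x => x.headD "")
  let keys := s.map (fun x => x.headD "")
  let lo := pvBisectLoop keys current_time_string 0 keys.length
  -- s[:lo], s[lo:] with 0 ≤ lo ≤ len(s): exactly take/drop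
  (s.take lo, s.drop lo)

-- ===== PRECONDITION & SPEC =====
-- Pre_ excludes exactly the inputs on which Python A raises IndexError: a reminder that is
-- an empty list makes the sort key x[0] (and s[i][0]) raise.
def Pre_split_into_happened_and_not_happened_ones (current_time_string : String) (all_reminders_list : List (List String)) : Prop :=
  ∀ r ∈ all_reminders_list, r ≠ []
instance (current_time_string : String) (all_reminders_list : List (List String)) : Decidable (Pre_split_into_happened_and_not_happened_ones current_time_string all_reminders_list) := by unfold Pre_split_into_happened_and_not_happened_ones; infer_instance

def pvWitness_split_into_happened_and_not_happened_ones : String × List (List String) :=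
  ("12:00", [["13:00", "tea"], ["11:00", "call"], ["12:00", "lunch"]])

def Spec_split_into_happened_and_not_happened_ones (current_time_string : String) (all_reminders_list : List (List String)) (out : List (List String) × List (List String)) : Prop := out = split_into_happened_and_not_happened_ones_alt current_time_string all_reminders_list
instance (current_time_string : String) (all_reminders_list : List (List String)) (out : List (List String) × List (List String)) : Decidable (Spec_split_into_happened_and_not_happened_ones current_time_string all_reminders_list out) := by unfold Spec_split_into_happened_and_not_happened_ones; infer_instance

-- ===== CLAIM (what is proved, stated in full; the proofs are below) =====
def Claim_equal_split_into_happened_and_not_happened_ones : Prop := ∀ (current_time_string : String) (all_reminders_list : List (List String)), Dom_split_into_happened_and_not_happened_ones current_time_string all_reminders_list → Pre_split_into_happened_and_not_happened_ones current_time_string all_reminders_list → Spec_split_into_happened_and_not_happened_ones current_time_string all_reminders_list (split_into_happened_and_not_happened_ones current_time_string all_reminders_list)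

-- ===== LEMMAS AND PROOFS =====

-- A's loop is the pair of filters (in order)
theorem pvFoldPartition (t : String) :
    ∀ (s : List (List String)) (h nh : List (List String)),
    s.foldl (fun (acc : List (List String) × List (List String)) x =>
        if x.headD "" ≤ t then (acc.1 ++ [x], acc.2)
        else (acc.1, acc.2 ++ [x])) (h, nh)
      = (h ++ s.filter (fun x => decide (x.headD "" ≤ t)),
         nh ++ s.filter (fun x => !decide (x.headD "" ≤ t))) := by
  intro s
  induction s with
  | nil => intro h nh; simp
  | cons a s ih =>
    intro h nh
    by_cases hc : a.headD "" ≤ t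
    · simp only [List.foldl_cons, ih, List.filter_cons, hc, decide_true]
      simp
    · simp only [List.foldl_cons, ih, List.filter_cons, hc, decide_false]
      simp

-- correctness of the hand-written bisect_right under the standard invariant
theorem pvBisectLoop_spec (keys : List String) (t : String)
    (hp : keys.Pairwise (· ≤ ·)) :
    ∀ lo hi, lo ≤ hi → hi ≤ keys.length →
      (∀ j, j < lo → keys.getD j "" ≤ t) →
      (∀ j, hi ≤ j → j < keys.length → t < keys.getD j "") →
      pvBisectLoop keys t lo hi ≤ keys.length ∧
      (∀ j, j < pvBisectLoop keys t lo hi → keys.getD j "" ≤ t) ∧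
      (∀ j, pvBisectLoop keys t lo hi ≤ j → j < keys.length → t < keys.getD j "") := by
  have hmono : ∀ (i j : Nat), i ≤ j → j < keys.length → keys.getD i "" ≤ keys.getD j "" := by
    intro i j hij hj
    rcases Nat.eq_or_lt_of_le hij with rfl | hlt
    · exact le_refl _
    · have := (List.pairwise_iff_getElem.mp hp) i j (by omega) hj hlt
      simpa [List.getD, List.getElem?_eq_getElem, Nat.lt_of_le_of_lt hij hj, hj] using this
  intro lo hi
  induction lo, hi using pvBisectLoop.induct keys t with
  | case1 lo hi h mid hcmp ih =>
    intro hle hhi hlow hhigh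
    have hmid : mid = (lo + hi) / 2 := rfl
    rw [hmid] at hcmp ih
    rw [pvBisectLoop]
    rw [dif_pos h, if_pos hcmp]
    exact ih (by omega) (by omega) hlow
      (fun j hj hjlen => lt_of_lt_of_le hcmp (hmono ((lo + hi) / 2) j hj hjlen))
  | case2 lo hi h mid hcmp ih =>
    intro hle hhi hlow hhigh
    have hmid : mid = (lo + hi) / 2 := rfl
    rw [hmid] at hcmp ih
    rw [pvBisectLoop]
    rw [dif_pos h, if_neg hcmp]
    have hmid_le : keys.getD ((lo + hi) / 2) "" ≤ t := le_of_not_gt hcmp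
    exact ih (by omega) hhi
      (fun j hj => le_trans (hmono j ((lo + hi) / 2) (by omega) (by omega)) hmid_le)
      hhigh
  | case3 lo hi h =>
    intro hle hhi hlow hhigh
    rw [pvBisectLoop]
    rw [dif_neg h]
    exact ⟨by omega, hlow, fun j hj hjlen => hhigh j (by omega) hjlen⟩

-- a pointwise split by index turns the two filters into take/drop
theorem pvFilterTakeDrop {α : Type} (p : α → Bool) :
    ∀ (s : List α) (r : Nat), r ≤ s.length →
      (∀ j, (h : j < s.length) → j < r → p s[j] = true) →
      (∀ j, (h : j < s.length) → r ≤ j → p s[j] = false) →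
      s.filter p = s.take r ∧ s.filter (fun x => !p x) = s.drop r := by
  intro s
  induction s with
  | nil => intro r _ _ _; simp
  | cons a s ih =>
    intro r hr hlow hhigh
    cases r with
    | zero =>
      have hall : ∀ x ∈ a :: s, p x = false := by
        intro x hx
        obtain ⟨j, hj, rfl⟩ := List.getElem_of_mem hx
        exact hhigh j hj (Nat.zero_le _)
      constructor
      · rw [List.take_zero]
        exact List.filter_eq_nil_iff.mpr (fun x hx => by simp [hall x hx])
      · rw [List.drop_zero]
        apply List.filter_eq_self.mpr
        intro x hx; simp [hall x hx]
    | succ r' =>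
      have hpa : p a = true := hlow 0 (by simp) (by omega)
      have := ih r' (by simpa using hr)
        (fun j hj hjr => hlow (j+1) (by simpa using Nat.succ_lt_succ hj) (by omega))
        (fun j hj hjr => hhigh (j+1) (by simpa using Nat.succ_lt_succ hj) (by omega))
      constructor
      · simp [hpa, this.1]
      · simp [hpa, this.2]

-- ===== VERDICT (by name: the statement is the Claim_ definition above) =====
theorem split_into_happened_and_not_happened_ones_spec : Claim_equal_split_into_happened_and_not_happened_ones := by
  intro t xs _hdom _hpre
  unfold Spec_split_into_happened_and_not_happened_ones
  unfold split_into_happened_and_not_happened_ones split_into_happened_and_not_happened_ones_alt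
  set s := PySem.List.sorted xs (fun x => x.headD "") with hs
  set keys := s.map (fun x => x.headD "") with hkeys
  set r := pvBisectLoop keys t 0 keys.length with hr
  have hp : keys.Pairwise (· ≤ ·) := by
    rw [hkeys, hs]; exact PySem.List.sorted_map_key_pairwise xs _
  have hspec := pvBisectLoop_spec keys t hp 0 keys.length (Nat.zero_le _) (le_refl _)
    (by omega) (by omega)
  have hlen : keys.length = s.length := by simp [hkeys]
  have hkey : ∀ j, (h : j < s.length) → keys.getD j "" = s[j].headD "" := by
    intro j h
    simp [hkeys, List.getD, h]
  have htd := pvFilterTakeDrop (fun x => decide (x.headD "" ≤ t)) s r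
    (by rw [← hlen]; exact hspec.1)
    (by intro j h hjr
        have := hspec.2.1 j hjr
        rw [hkey j h] at this
        simpa using this)
    (by intro j h hjr
        have := hspec.2.2 j hjr (by omega)
        rw [hkey j h] at this
        simpa using not_le_of_gt this)
  show _ = (s.take r, s.drop r)
  rw [pvFoldPartition t s [] [], htd.1, ← htd.2]
  simp
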